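-- pv_equiv track=rewrite | github.com/KonstantinBab/OpenKonst_B | src/coding_agent/core/repo_scan.py | _collect_security_boundaries
-- ===== SOURCE A (Python) =====
-- def _collect_security_boundaries(rel_paths: list[str]) -> list[str]:
--     boundaries: list[str] = []
--     checks = (
--         ("WorkspaceGuard", "sandbox/workspace_guard.py"),
--         ("CommandPolicyEngine", "sandbox/command_policy.py"),
--         ("ShellRunner", "sandbox/shell_runner.py"),
--         ("PolicyConfig", "config/policy.yaml"),
--     )
--     for label, token in checks:
--         if any(token in path for path in rel_paths):
--             boundaries.append(label)
--     return boundaries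
-- ===== SOURCE B (Python) =====
-- def _collect_security_boundaries(rel_paths: list[str]) -> list[str]:
--     checks = (
--         ("WorkspaceGuard", "sandbox/workspace_guard.py"),
--         ("CommandPolicyEngine", "sandbox/command_policy.py"),
--         ("ShellRunner", "sandbox/shell_runner.py"),
--         ("PolicyConfig", "config/policy.yaml"),
--     )
--     found = set()
--     for path in rel_paths:
--         for label, token in checks:
--             if token in path:
--                 found.add(label)
--     return [label for label, _ in checks if label in found]
-- ===== Notes on version B (the rewrite author's own statement) =====
-- stated objective: alternative
-- what changed: Inverted loop nesting: one pass over rel_paths accumulating a set of matched labels, then the result is emitted by filtering the fixed checks tuple against that set, instead of four independent short-circuiting any() scans over the whole list.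
import Mathlib
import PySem

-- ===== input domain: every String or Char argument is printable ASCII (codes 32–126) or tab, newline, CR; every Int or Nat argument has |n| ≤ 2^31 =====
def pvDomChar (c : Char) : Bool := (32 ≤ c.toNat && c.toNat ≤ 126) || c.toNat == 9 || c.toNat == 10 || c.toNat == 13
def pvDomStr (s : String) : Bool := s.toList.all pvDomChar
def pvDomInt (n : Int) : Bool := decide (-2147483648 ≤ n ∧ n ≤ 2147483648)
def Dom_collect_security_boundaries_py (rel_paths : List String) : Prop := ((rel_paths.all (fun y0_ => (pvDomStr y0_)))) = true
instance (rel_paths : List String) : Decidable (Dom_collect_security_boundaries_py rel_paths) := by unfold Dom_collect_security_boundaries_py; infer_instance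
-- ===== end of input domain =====

-- B inverts the loop nesting: one pass over rel_paths accumulating a set of matched labels,
-- then the result is built by filtering the fixed checks tuple (objective: alternative).

-- the fixed (label, token) tuple both Python versions carry verbatim
def pvChecks : List (String × String) :=
  [("WorkspaceGuard", "sandbox/workspace_guard.py"),
   ("CommandPolicyEngine", "sandbox/command_policy.py"),
   ("ShellRunner", "sandbox/shell_runner.py"),
   ("PolicyConfig", "config/policy.yaml")]

-- ===== PORT A =====
def collect_security_boundaries_py (rel_paths : List String) : List String :=
  pvChecks.foldl (fun boundaries lt =>
    if rel_paths.any (fun path => PySem.Str.isIn lt.2 path) then boundaries ++ [lt.1]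
    else boundaries) []

-- ===== PORT B =====
def pvFound (rel_paths : List String) : PySem.Set String :=
  rel_paths.foldl (fun found path =>
    pvChecks.foldl (fun found lt =>
      if PySem.Str.isIn lt.2 path then PySem.Set.add found lt.1 else found) found)
    PySem.Set.empty

def collect_security_boundaries_py_alt (rel_paths : List String) : List String :=
  (pvChecks.filter (fun lt => PySem.Set.contains (pvFound rel_paths) lt.1)).map (fun lt => lt.1)

-- ===== PRECONDITION & SPEC =====
def Spec_collect_security_boundaries_py (rel_paths : List String) (out : List String) : Prop := out = collect_security_boundaries_py_alt rel_paths
instance (rel_paths : List String) (out : List String) : Decidable (Spec_collect_security_boundaries_py rel_paths out) := by unfold Spec_collect_security_boundaries_py; infer_instance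

-- ===== CLAIM (what is proved, stated in full; the proofs are below) =====
def Claim_equal_collect_security_boundaries_py : Prop := ∀ (rel_paths : List String), Dom_collect_security_boundaries_py rel_paths → Spec_collect_security_boundaries_py rel_paths (collect_security_boundaries_py rel_paths)

-- ===== LEMMAS AND PROOFS =====

-- membership after the inner (checks) loop
theorem mem_inner (L : List (String × String)) (c : String × String → Bool)
    (s : PySem.Set String) (l : String) :
    l ∈ L.foldl (fun s lt => if c lt then PySem.Set.add s lt.1 else s) s ↔
      l ∈ s ∨ ∃ lt ∈ L, lt.1 = l ∧ c lt = true := by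
  induction L generalizing s with
  | nil => simp
  | cons hd tl ih =>
    simp only [List.foldl_cons, ih]
    by_cases h : c hd = true
    · simp [h, PySem.Set.mem_add]; tauto
    · simp [h]

-- membership after the outer (rel_paths) loop
theorem mem_found (rel_paths : List String) (l : String) :
    l ∈ pvFound rel_paths ↔
      ∃ p ∈ rel_paths, ∃ lt ∈ pvChecks, lt.1 = l ∧ PySem.Str.isIn lt.2 p = true := by
  unfold pvFound
  have : ∀ (s : PySem.Set String),
      l ∈ rel_paths.foldl (fun found path =>
        pvChecks.foldl (fun found lt =>
          if PySem.Str.isIn lt.2 path then PySem.Set.add found lt.1 else found) found) s ↔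
      l ∈ s ∨ ∃ p ∈ rel_paths, ∃ lt ∈ pvChecks, lt.1 = l ∧ PySem.Str.isIn lt.2 p = true := by
    induction rel_paths with
    | nil => simp
    | cons hd tl ih =>
      intro s
      simp only [List.foldl_cons, ih, mem_inner]
      constructor
      · rintro (h | h)
        · rcases h with h | ⟨lt, hm, he, hc⟩
          · exact Or.inl h
          · exact Or.inr ⟨hd, by simp, lt, hm, he, hc⟩
        · rcases h with ⟨p, hp, rest⟩
          exact Or.inr ⟨p, by simp [hp], rest⟩
      · rintro (h | ⟨p, hp, rest⟩)
        · exact Or.inl (Or.inl h)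
        · rcases List.mem_cons.mp hp with rfl | hp
          · exact Or.inl (Or.inr rest)
          · exact Or.inr ⟨p, hp, rest⟩
  simpa [PySem.Set.empty] using this PySem.Set.empty

-- for each of the four labels, membership in the accumulated set is exactly A's any() condition
theorem contains_found (rel_paths : List String) (lab tok : String)
    (h : ∀ p, (∃ lt ∈ pvChecks, lt.1 = lab ∧ PySem.Str.isIn lt.2 p = true) ↔
              PySem.Str.isIn tok p = true) :
    PySem.Set.contains (pvFound rel_paths) lab =
      rel_paths.any (fun path => PySem.Str.isIn tok path) := by
  rw [Bool.eq_iff_iff, PySem.Set.contains_iff, mem_found, List.any_eq_true]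
  constructor
  · rintro ⟨p, hp, hrest⟩; exact ⟨p, hp, (h p).mp hrest⟩
  · rintro ⟨p, hp, hc⟩; exact ⟨p, hp, (h p).mpr hc⟩

-- ===== VERDICT (by name: the statement is the Claim_ definition above) =====
theorem collect_security_boundaries_py_spec : Claim_equal_collect_security_boundaries_py := by
  intro rel_paths _
  unfold Spec_collect_security_boundaries_py collect_security_boundaries_py collect_security_boundaries_py_alt
  rw [PySem.List.foldl_append_if, List.nil_append]
  congr 1
  apply List.filter_congr
  intro lt hlt
  have hm : lt = ("WorkspaceGuard", "sandbox/workspace_guard.py") ∨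
      lt = ("CommandPolicyEngine", "sandbox/command_policy.py") ∨
      lt = ("ShellRunner", "sandbox/shell_runner.py") ∨
      lt = ("PolicyConfig", "config/policy.yaml") := by simpa [pvChecks] using hlt
  rcases hm with rfl | rfl | rfl | rfl
  · exact (contains_found rel_paths "WorkspaceGuard" "sandbox/workspace_guard.py"
      (by intro p; simp [pvChecks])).symm
  · exact (contains_found rel_paths "CommandPolicyEngine" "sandbox/command_policy.py"
      (by intro p; simp [pvChecks])).symm
  · exact (contains_found rel_paths "ShellRunner" "sandbox/shell_runner.py"
      (by intro p; simp [pvChecks])).symm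
  · exact (contains_found rel_paths "PolicyConfig" "config/policy.yaml"
      (by intro p; simp [pvChecks])).symm
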